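-- pv_equiv track=rewrite | github.com/Jaison245/Library_Digitalization | library.py | BooksMerge
-- ===== SOURCE A (Python) =====
-- def BooksMerge(leftBooks, rightBooks):
--     #An empty list is initialized to hold the merged and sorted books.
--     soretedList = []
--
--     #pointers for left and right sublists
--     i = j = 0 #i is the left pointer
--               #j is the right pointer
--
--     # Traverse both lists until one of them is exhausted.
--     while i< len(leftBooks) and j < len(rightBooks):
--         # The titles are extracted from the current elements in left and right lists.
--         leftTitle= leftBooks[i][1]
--         rightTitle = rightBooks[j][1]
--         # If the title in the left list is lexicographically smaller, add it to the sorted list.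
--         if leftTitle < rightTitle:
--             # Check if `soretedList` is empty or does not already have this title at the end.
--             if not soretedList or soretedList[-1][1] != leftTitle:
--                 soretedList.append(leftBooks[i])
--             i+= 1 #traversal in the left list
--         # If the title in the right list is lexicographically smaller, add it to the sorted list.
--         elif leftTitle > rightTitle:
--             # Check if `soretedList` is empty or does not already have this title at the end.
--             if not soretedList or soretedList[-1][1] != rightTitle:
--                 soretedList.append(rightBooks[j])
--             j += 1 #traversal in the right list
--             # If titles are the same, add the book from the left list to avoid duplicates.
--         else:
--             # Ensure `soretedList` does not already have this title at the end
--             if not soretedList or soretedList[-1][1] != leftTitle: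
--                 soretedList.append(leftBooks[i])
--             #traverse in both the lists to avoid duplicates
--             i+= 1
--             j += 1
--     # Append any remaining elements from the left list, ensuring no duplicates.
--     while i< len(leftBooks):
--         if not soretedList or soretedList[-1][1] != leftBooks[i][1]:
--             soretedList.append(leftBooks[i])
--         i+= 1
--     # Append any remaining elements from the right list, ensuring no duplicates.
--     while j < len(rightBooks):
--         if not soretedList or soretedList[-1][1] != rightBooks[j][1]:
--             soretedList.append(rightBooks[j])
--         j += 1
--     return soretedList
-- ===== SOURCE B (Python) =====
-- def BooksMerge(leftBooks, rightBooks):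
--     # Pass 1: plain two-pointer merge (same tie rule: equal titles -> take left, advance both), no dedup.
--     merged = []
--     i = j = 0
--     while i < len(leftBooks) and j < len(rightBooks):
--         lt = leftBooks[i][1]
--         rt = rightBooks[j][1]
--         if lt < rt:
--             merged.append(leftBooks[i])
--             i += 1
--         elif lt > rt:
--             merged.append(rightBooks[j])
--             j += 1
--         else:
--             merged.append(leftBooks[i])
--             i += 1
--             j += 1
--     merged.extend(leftBooks[i:])
--     merged.extend(rightBooks[j:])
--     # Pass 2: drop an element when its title equals the title of the last kept element.
--     result = []
--     for b in merged:
--         if not result or result[-1][1] != b[1]: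
--             result.append(b)
--     return result
-- ===== Notes on version B (the rewrite author's own statement) =====
-- stated objective: simpler
-- what changed: Splits A's single interleaved loop into two independent passes: a plain two-pointer merge with no dedup guard, then one separate adjacent-title dedup sweep over the merged list.
import Mathlib
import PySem

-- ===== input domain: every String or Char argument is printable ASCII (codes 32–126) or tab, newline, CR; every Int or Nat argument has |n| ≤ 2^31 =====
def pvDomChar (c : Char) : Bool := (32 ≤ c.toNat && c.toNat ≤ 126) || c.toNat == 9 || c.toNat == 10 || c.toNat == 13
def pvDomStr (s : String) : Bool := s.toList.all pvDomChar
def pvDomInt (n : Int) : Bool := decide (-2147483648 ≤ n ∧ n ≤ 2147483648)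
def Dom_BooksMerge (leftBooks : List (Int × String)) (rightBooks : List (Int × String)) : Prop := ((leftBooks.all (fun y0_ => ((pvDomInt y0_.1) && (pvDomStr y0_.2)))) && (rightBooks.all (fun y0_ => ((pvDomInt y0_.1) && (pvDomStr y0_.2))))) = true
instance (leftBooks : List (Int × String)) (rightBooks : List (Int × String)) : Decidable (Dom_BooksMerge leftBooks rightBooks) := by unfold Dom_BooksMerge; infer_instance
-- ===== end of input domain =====

-- B replaces A's single interleaved merge+dedup loop by two independent passes (raw merge, then adjacent-title dedup); objective: simpler.


-- ===== PORT A =====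
-- 'if not soretedList or soretedList[-1][1] != t: soretedList.append(b)'
def BooksMerge_push (acc : List (Int × String)) (b : Int × String) : List (Int × String) :=
  if acc.getLast?.map Prod.snd ≠ some b.2 then acc ++ [b] else acc

-- the two trailing 'while' drains of A (one per remaining list)
def BooksMerge_drain (acc : List (Int × String)) : List (Int × String) → List (Int × String)
  | [] => acc
  | x :: xs => BooksMerge_drain (BooksMerge_push acc x) xs

-- the main 'while i < len and j < len' loop of A
def BooksMerge_loop : List (Int × String) → List (Int × String) → List (Int × String) → List (Int × String)
  | l :: ls, r :: rs, acc =>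
      if l.2 < r.2 then BooksMerge_loop ls (r :: rs) (BooksMerge_push acc l)
      else if r.2 < l.2 then BooksMerge_loop (l :: ls) rs (BooksMerge_push acc r)
      else BooksMerge_loop ls rs (BooksMerge_push acc l)
  | ls, rs, acc => BooksMerge_drain (BooksMerge_drain acc ls) rs

def BooksMerge (leftBooks : List (Int × String)) (rightBooks : List (Int × String)) : List (Int × String) :=
  BooksMerge_loop leftBooks rightBooks []

-- ===== PORT B =====
-- pass 1 of Source B: plain two-pointer merge, no dedup, then the two extends
def BooksMerge_rawMerge : List (Int × String) → List (Int × String) → List (Int × String)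
  | l :: ls, r :: rs =>
      if l.2 < r.2 then l :: BooksMerge_rawMerge ls (r :: rs)
      else if r.2 < l.2 then r :: BooksMerge_rawMerge (l :: ls) rs
      else l :: BooksMerge_rawMerge ls rs
  | ls, rs => ls ++ rs

-- pass 2 of Source B: 'for b in merged: if not result or result[-1][1] != b[1]: result.append(b)'
def BooksMerge_dedup (res : List (Int × String)) : List (Int × String) → List (Int × String)
  | [] => res
  | b :: bs =>
      if res.getLast?.map Prod.snd ≠ some b.2 then BooksMerge_dedup (res ++ [b]) bs
      else BooksMerge_dedup res bs

def BooksMerge_alt (leftBooks : List (Int × String)) (rightBooks : List (Int × String)) : List (Int × String) :=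
  BooksMerge_dedup [] (BooksMerge_rawMerge leftBooks rightBooks)

-- ===== PRECONDITION & SPEC =====
def Spec_BooksMerge (leftBooks : List (Int × String)) (rightBooks : List (Int × String)) (out : List (Int × String)) : Prop := out = BooksMerge_alt leftBooks rightBooks
instance (leftBooks : List (Int × String)) (rightBooks : List (Int × String)) (out : List (Int × String)) : Decidable (Spec_BooksMerge leftBooks rightBooks out) := by unfold Spec_BooksMerge; infer_instance

-- ===== CLAIM (what is proved, stated in full; the proofs are below) =====
def Claim_equal_BooksMerge : Prop := ∀ (leftBooks : List (Int × String)) (rightBooks : List (Int × String)), Dom_BooksMerge leftBooks rightBooks → Spec_BooksMerge leftBooks rightBooks (BooksMerge leftBooks rightBooks)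

-- ===== LEMMAS AND PROOFS =====
theorem dedup_cons (res : List (Int × String)) (b : Int × String) (bs : List (Int × String)) :
    BooksMerge_dedup res (b :: bs) = BooksMerge_dedup (BooksMerge_push res b) bs := by
  by_cases h : res.getLast?.map Prod.snd ≠ some b.2 <;>
    simp [BooksMerge_dedup, BooksMerge_push, h]

theorem drain_eq_dedup (acc : List (Int × String)) (xs : List (Int × String)) :
    BooksMerge_drain acc xs = BooksMerge_dedup acc xs := by
  induction xs generalizing acc with
  | nil => rfl
  | cons x xs ih => rw [BooksMerge_drain, dedup_cons, ih]

theorem loop_eq_dedup_rawMerge (ls rs acc : List (Int × String)) :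
    BooksMerge_loop ls rs acc = BooksMerge_dedup acc (BooksMerge_rawMerge ls rs) := by
  induction ls, rs, acc using BooksMerge_loop.induct with
  | case1 l ls r rs acc hlt ih =>
      rw [BooksMerge_loop, BooksMerge_rawMerge, if_pos hlt, if_pos hlt, dedup_cons, ih]
  | case2 l ls r rs acc hlt hgt ih =>
      rw [BooksMerge_loop, BooksMerge_rawMerge, if_neg hlt, if_neg hlt, if_pos hgt, if_pos hgt,
        dedup_cons, ih]
  | case3 l ls r rs acc hlt hgt ih =>
      rw [BooksMerge_loop, BooksMerge_rawMerge, if_neg hlt, if_neg hlt, if_neg hgt, if_neg hgt,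
        dedup_cons, ih]
  | case4 ls rs acc h =>
      cases ls with
      | nil =>
          simp [BooksMerge_loop, BooksMerge_rawMerge, BooksMerge_drain, drain_eq_dedup]
      | cons l ls' =>
          cases rs with
          | nil =>
              simp [BooksMerge_loop, BooksMerge_rawMerge, BooksMerge_drain, drain_eq_dedup, dedup_cons]
          | cons r rs' => exact (h l ls' r rs' rfl rfl).elim

-- ===== VERDICT (by name: the statement is the Claim_ definition above) =====
theorem BooksMerge_spec : Claim_equal_BooksMerge := by
  intro ls rs _
  unfold Spec_BooksMerge BooksMerge BooksMerge_alt
  exact loop_eq_dedup_rawMerge ls rs []
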